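-- pv_equiv track=rewrite | github.com/lakshyamehta03/simplexity-web | backend/focused_extractor.py | extract_with_keywords
-- ===== SOURCE A (Python) =====
-- def extract_with_keywords(query: str, content: str) -> str:
--     """
--     Simple keyword-based extraction as fallback method.
--     """
--     # Split content into sentences
--     sentences = content.replace('\n', ' ').split('. ')
--
--     # Extract keywords from query (simple approach)
--     query_words = set(query.lower().split())
--     # Remove common stop words
--     stop_words = {'the', 'a', 'an', 'and', 'or', 'but', 'in', 'on', 'at', 'to', 'for', 'of', 'with', 'by', 'is', 'are', 'was', 'were', 'what', 'how', 'why', 'when', 'where'}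
--     query_words = query_words - stop_words
--
--     # Score sentences based on keyword matches
--     scored_sentences = []
--     for sentence in sentences:
--         if len(sentence.strip()) < 20:  # Skip very short sentences
--             continue
--
--         sentence_lower = sentence.lower()
--         score = sum(1 for word in query_words if word in sentence_lower)
--
--         if score > 0:
--             scored_sentences.append((score, sentence.strip()))
--
--     # Sort by score and take top sentences
--     scored_sentences.sort(key=lambda x: x[0], reverse=True)
--     top_sentences = [sent[1] for sent in scored_sentences[:10]]  # Top 10 sentences
--
--     result = '. '.join(top_sentences)
--     return result if result else content[:2000]
-- ===== SOURCE B (Python) =====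
-- def extract_with_keywords(query: str, content: str) -> str:
--     """
--     Keyword-based extraction: same scoring, but instead of materializing all
--     scored sentences and sorting them, a single pass keeps a bounded running
--     top-10 list (online insertion into a descending buffer, evicting the 11th),
--     so the full scored list is never built or sorted.
--     """
--     stop_words = {'the', 'a', 'an', 'and', 'or', 'but', 'in', 'on', 'at', 'to', 'for', 'of', 'with', 'by', 'is', 'are', 'was', 'were', 'what', 'how', 'why', 'when', 'where'}
--     keywords = set(query.lower().split()) - stop_words
--
--     top = []  # descending by score, stable for ties, never longer than 10
--     for sentence in content.replace('\n', ' ').split('. '):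
--         stripped = sentence.strip()
--         if len(stripped) < 20:
--             continue
--         low = sentence.lower()
--         score = sum(1 for w in keywords if w in low)
--         if score <= 0:
--             continue
--         i = 0
--         while i < len(top) and top[i][0] >= score:
--             i += 1
--         top.insert(i, (score, stripped))
--         if len(top) > 10:
--             top.pop()
--
--     result = '. '.join(s for _, s in top)
--     return result if result else content[:2000]
-- ===== Notes on version B (the rewrite author's own statement) =====
-- stated objective: alternative
-- what changed: B never materializes or sorts the scored-sentence list: one pass over the sentences maintains a bounded running top-10 buffer by online insertion (descending by score, stable for ties) and evicts the 11th element, replacing A's build-then-stable-reverse-sort-then-slice selection.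
import Mathlib
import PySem

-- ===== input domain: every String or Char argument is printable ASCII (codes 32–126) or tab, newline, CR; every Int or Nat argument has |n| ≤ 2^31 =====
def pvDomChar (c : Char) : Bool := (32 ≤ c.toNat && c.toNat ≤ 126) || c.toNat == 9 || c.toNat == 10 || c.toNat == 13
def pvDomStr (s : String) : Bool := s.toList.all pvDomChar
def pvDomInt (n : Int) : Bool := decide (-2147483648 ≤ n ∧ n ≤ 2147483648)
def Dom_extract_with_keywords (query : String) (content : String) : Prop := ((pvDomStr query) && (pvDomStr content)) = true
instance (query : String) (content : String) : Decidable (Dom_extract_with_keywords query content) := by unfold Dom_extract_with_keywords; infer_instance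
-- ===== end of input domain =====

-- B replaces A's build-all-then-stable-reverse-sort-then-slice selection by a single pass that keeps a
-- bounded running top-10 buffer (online insertion, descending by score, stable ties, evicting the 11th).


-- ===== PORT A =====
-- the stop-word set literal (used only through membership, so its iteration order is irrelevant)
def pvStopWords : List String := ["the", "a", "an", "and", "or", "but", "in", "on", "at", "to", "for", "of", "with", "by", "is", "are", "was", "were", "what", "how", "why", "when", "where"]

def extract_with_keywords (query : String) (content : String) : String :=
  -- sep ". " is a non-empty literal, so Python's split never raises: split? is always `some`
  let sentences := (PySem.Str.split? (PySem.Str.replace content "\n" " ") ". ").getD []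
  let query_words := PySem.Set.diff (PySem.Set.ofList (PySem.Str.split₀ (PySem.Str.lower query))) (PySem.Set.ofList pvStopWords)
  let scored_sentences := sentences.foldl (fun acc sentence =>
    if PySem.Str.len (PySem.Str.strip sentence) < 20 then acc
    else
      let sentence_lower := PySem.Str.lower sentence
      -- sum(1 for word in query_words if word in sentence_lower): an order-independent sum over the set
      let score : Int := ((query_words.filter (fun word => PySem.Str.isIn word sentence_lower)).map (fun _ => (1 : Int))).sum
      if score > 0 then acc ++ [(score, PySem.Str.strip sentence)] else acc) []
  let top_sentences := (PySem.List.slice (PySem.List.sorted scored_sentences (fun x => x.1) true) none (some 10)).map (fun sent => sent.2)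
  let result := PySem.Str.join ". " top_sentences
  if result = "" then PySem.Str.slice content none (some 2000) else result

-- ===== PORT B =====
-- the while-loop + list.insert of Source B: walk past entries with score ≥ sc, insert (sc, t) there
def pvInsertTop (sc : Int) (t : String) : List (Int × String) → List (Int × String)
  | [] => [(sc, t)]
  | p :: rest => if sc ≤ p.1 then p :: pvInsertTop sc t rest else (sc, t) :: p :: rest

-- the 'if len(top) > 10: top.pop()' eviction of Source B
def pvCap10 (l : List (Int × String)) : List (Int × String) :=
  if 10 < l.length then l.dropLast else l

def extract_with_keywords_alt (query : String) (content : String) : String :=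
  let keywords := PySem.Set.diff (PySem.Set.ofList (PySem.Str.split₀ (PySem.Str.lower query))) (PySem.Set.ofList pvStopWords)
  -- sep ". " is a non-empty literal, so Python's split never raises: split? is always `some`
  let top := ((PySem.Str.split? (PySem.Str.replace content "\n" " ") ". ").getD []).foldl
    (fun top sentence =>
      let stripped := PySem.Str.strip sentence
      if PySem.Str.len stripped < 20 then top
      else
        let low := PySem.Str.lower sentence
        let score : Int := ((keywords.filter (fun w => PySem.Str.isIn w low)).map (fun _ => (1 : Int))).sum
        if score ≤ 0 then top
        else pvCap10 (pvInsertTop score stripped top)) []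
  let result := PySem.Str.join ". " (top.map (fun p => p.2))
  if result = "" then PySem.Str.slice content none (some 2000) else result

-- ===== PRECONDITION & SPEC =====
def Spec_extract_with_keywords (query : String) (content : String) (out : String) : Prop := out = extract_with_keywords_alt query content
instance (query : String) (content : String) (out : String) : Decidable (Spec_extract_with_keywords query content out) := by unfold Spec_extract_with_keywords; infer_instance

-- ===== CLAIM (what is proved, stated in full; the proofs are below) =====
def Claim_equal_extract_with_keywords : Prop := ∀ (query : String) (content : String), Dom_extract_with_keywords query content → Spec_extract_with_keywords query content (extract_with_keywords query content)

-- ===== LEMMAS AND PROOFS =====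

-- the scored entry a sentence contributes (none = skipped), shared shape of both folds (proof-only)
def pvEntry (K : PySem.Set String) (s : String) : Option (Int × String) :=
  let t := PySem.Str.strip s
  if PySem.Str.len t < 20 then none
  else
    let sc : Int := ((K.filter (fun w => PySem.Str.isIn w (PySem.Str.lower s))).map (fun _ => (1 : Int))).sum
    if sc ≤ 0 then none else some (sc, t)

-- A's append-fold over the sentences builds exactly the filterMap of pvEntry.
theorem pvScored_eq (K : PySem.Set String) (l : List String) (acc : List (Int × String)) :
    l.foldl (fun acc sentence =>
      if PySem.Str.len (PySem.Str.strip sentence) < 20 then acc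
      else
        let sentence_lower := PySem.Str.lower sentence
        let score : Int := ((K.filter (fun word => PySem.Str.isIn word sentence_lower)).map (fun _ => (1 : Int))).sum
        if score > 0 then acc ++ [(score, PySem.Str.strip sentence)] else acc) acc
    = acc ++ l.filterMap (pvEntry K) := by
  induction l generalizing acc with
  | nil => simp
  | cons s l ih =>
    simp only [List.foldl_cons, List.filterMap_cons, pvEntry]
    split_ifs with h1 h2 h3 h4 <;>
      first
        | omega
        | (rw [ih]; rfl)
        | (rw [ih]; simp only [List.append_assoc]; rfl)

-- B's single pass over the sentences is the capped-insert fold over that same filterMap.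
theorem pvBfold_eq (K : PySem.Set String) (l : List String) (acc : List (Int × String)) :
    l.foldl (fun top sentence =>
      let stripped := PySem.Str.strip sentence
      if PySem.Str.len stripped < 20 then top
      else
        let low := PySem.Str.lower sentence
        let score : Int := ((K.filter (fun w => PySem.Str.isIn w low)).map (fun _ => (1 : Int))).sum
        if score ≤ 0 then top
        else pvCap10 (pvInsertTop score stripped top)) acc
    = (l.filterMap (pvEntry K)).foldl (fun a p => pvCap10 (pvInsertTop p.1 p.2 a)) acc := by
  induction l generalizing acc with
  | nil => simp
  | cons s l ih =>
    simp only [List.foldl_cons, List.filterMap_cons, pvEntry]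
    split_ifs <;> simp only [List.foldl_cons] <;> exact ih _

-- Source B's while-loop insertion is exactly the stable-descending insertBy of the library sort.
theorem pvInsertTop_eq (sc : Int) (t : String) (l : List (Int × String)) :
    pvInsertTop sc t l = PySem.List.insertBy (fun a b => decide (b.1 < a.1)) (sc, t) l := by
  induction l with
  | nil => rfl
  | cons p rest ih =>
    show (if sc ≤ p.1 then p :: pvInsertTop sc t rest else (sc, t) :: p :: rest)
      = (if decide (p.1 < sc) = true then (sc, t) :: p :: rest else p :: PySem.List.insertBy _ (sc, t) rest)
    by_cases h : sc ≤ p.1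
    · rw [if_pos h, if_neg (by simpa using not_lt.mpr h), ih]
    · rw [if_neg h, if_pos (by simpa using lt_of_not_ge h)]

theorem pvLength_insertBy {α : Type} (before : α → α → Bool) (x : α) (l : List α) :
    (PySem.List.insertBy before x l).length = l.length + 1 := by
  induction l with
  | nil => rfl
  | cons y ys ih =>
    show (if before x y = true then x :: y :: ys else y :: PySem.List.insertBy before x ys).length = _
    split_ifs <;> simp [ih]

-- truncating before or after an insertion gives the same first k elements
theorem pvTake_insertBy {α : Type} (before : α → α → Bool) (x : α) (l : List α) (k : Nat) :
    (PySem.List.insertBy before x l).take k = (PySem.List.insertBy before x (l.take k)).take k := by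
  induction l generalizing k with
  | nil => simp
  | cons y ys ih =>
    cases k with
    | zero => simp
    | succ n =>
      show (if before x y = true then x :: y :: ys else y :: PySem.List.insertBy before x ys).take (n+1)
        = (if before x y = true then x :: y :: ys.take n else y :: PySem.List.insertBy before x (ys.take n)).take (n+1)
      split_ifs with h
      · simp only [List.take_succ_cons, List.cons.injEq, true_and]
        cases n with
        | zero => simp
        | succ m =>
          simp only [List.take_succ_cons, List.cons.injEq, true_and]
          rw [List.take_take]
          congr 1
          omega
      · simp only [List.take_succ_cons, List.cons.injEq, true_and]
        exact ih n

-- the insertBy fold only ever looks at the first k elements of its accumulator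
theorem pvFoldl_ins_take {α : Type} (before : α → α → Bool) (xs : List α) (k : Nat) :
    ∀ l l' : List α, l.take k = l'.take k →
      (xs.foldl (fun a x => PySem.List.insertBy before x a) l).take k
        = (xs.foldl (fun a x => PySem.List.insertBy before x a) l').take k := by
  induction xs with
  | nil => intro l l' h; simpa using h
  | cons x xs ih =>
    intro l l' h
    simp only [List.foldl_cons]
    exact ih _ _ (by rw [pvTake_insertBy, pvTake_insertBy before x l', h])

-- capping after insertion into a ≤10-buffer is truncation to 10
theorem pvCap10_eq_take (x : Int × String) (l : List (Int × String)) (h : l.length ≤ 10) :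
    pvCap10 (PySem.List.insertBy (fun a b => decide (b.1 < a.1)) x l)
      = (PySem.List.insertBy (fun a b => decide (b.1 < a.1)) x l).take 10 := by
  unfold pvCap10
  have hlen := pvLength_insertBy (fun a b => decide (b.1 < a.1)) x l
  split_ifs with hgt
  · rw [List.dropLast_eq_take]
    congr 1
    omega
  · rw [List.take_of_length_le (by omega)]

-- MAIN INVARIANT: the online capped-insert fold computes the first 10 of the full insertBy fold.
theorem pvCapFold_eq (xs : List (Int × String)) :
    ∀ l : List (Int × String), l.length ≤ 10 →
      xs.foldl (fun a p => pvCap10 (pvInsertTop p.1 p.2 a)) l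
        = (xs.foldl (fun a p => PySem.List.insertBy (fun a b => decide (b.1 < a.1)) p a) l).take 10 := by
  induction xs with
  | nil =>
    intro l h
    simp only [List.foldl_nil]
    exact (List.take_of_length_le h).symm
  | cons x xs ih =>
    intro l h
    simp only [List.foldl_cons]
    rw [pvInsertTop_eq, pvCap10_eq_take _ _ h, ih _ (by simp)]
    exact pvFoldl_ins_take _ xs 10 _ _ (by simp [List.take_take])

theorem pvMain (query content : String) :
    extract_with_keywords query content = extract_with_keywords_alt query content := by
  simp only [extract_with_keywords, extract_with_keywords_alt]
  rw [pvScored_eq, pvBfold_eq, List.nil_append,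
      pvCapFold_eq _ [] (by simp),
      PySem.List.slice_to _ (by omega)]
  rw [show ((10 : Int).toNat) = 10 from rfl,
      show (PySem.List.sorted (List.filterMap (pvEntry _) _) (fun x => x.1) true)
          = List.foldl (fun a p => PySem.List.insertBy (fun a b : Int × String => decide (b.1 < a.1)) p a)
              [] (List.filterMap (pvEntry _) _)
        from PySem.List.sorted_rev_eq_foldl_insertBy _ _,
      List.map_take]

-- ===== VERDICT (by name: the statement is the Claim_ definition above) =====
theorem extract_with_keywords_spec : Claim_equal_extract_with_keywords := by
  intro query content _
  exact pvMain query content
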